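-- pv_equiv track=rewrite | github.com/TongmingLAIC/AppForge | AppForge/extracts.py | extract_fuzz
-- ===== SOURCE A (Python) =====
-- def extract_fuzz(log: str):
--     """
--     Extract fuzzing results from fuzzing log output.
--
--     This function analyzes the fuzzing log to detect various types of crashes
--     and failures that occurred during the fuzzing process, including native crashes,
--     Java crashes, ANRs (Application Not Responding), and startup failures.
--
--     Args:
--         log (str): The complete fuzzing log output as a string.
--
--     Returns:
--         dict: A dictionary containing fuzzing results with the following keys:
--             - no_crash (int): 1 if no crashes detected in any cycle, 0 otherwise
--             - native (int): 1 if native crash detected, 0 otherwise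
--             - java (int): 1 if Java crash detected, 0 otherwise
--             - anr (int): 1 if ANR detected, 0 otherwise
--             - failtostart (int): 1 if app failed to start, 0 otherwise
--     """
--     result = {
--         'compile':0,
--         'no_crash':0,
--         'native':0,
--         'java':0,
--         'anr':0,
--         'failtostart':0,
--     }
--     if 'Starting app...' in log:
--         result['compile'] = 1
--     cycles = log.split('Starting app...')
--     crash_cnt,cycle_cnt = 0,0
--     for i in cycles[1:]:
--         cycle_cnt += 1
--         if 'Native crash detected!' in i:
--             crash_cnt += 1
--             result['native'] = 1
--         if 'Java crash detected!' in i: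
--             crash_cnt += 1
--             result['java'] = 1
--         if 'ANR detected!' in i:
--             crash_cnt += 1
--             result['anr'] = 1
--         if 'Failed to start' in i:
--             crash_cnt += 1
--             result['failtostart'] = 1
--     if cycle_cnt:
--         if crash_cnt==0:
--             result['no_crash'] = 1
--
--     return result
-- ===== SOURCE B (Python) =====
-- def extract_fuzz(log: str):
--     sep = 'Starting app...'
--     i = log.find(sep)
--     started = i != -1
--     tail = log[i + len(sep):] if started else ''
--     native = 1 if 'Native crash detected!' in tail else 0
--     java = 1 if 'Java crash detected!' in tail else 0
--     anr = 1 if 'ANR detected!' in tail else 0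
--     failtostart = 1 if 'Failed to start' in tail else 0
--     no_crash = 1 if started and not (native or java or anr or failtostart) else 0
--     return {
--         'compile': 1 if started else 0,
--         'no_crash': no_crash,
--         'native': native,
--         'java': java,
--         'anr': anr,
--         'failtostart': failtostart,
--     }
-- ===== Notes on version B (the rewrite author's own statement) =====
-- stated objective: simpler
-- what changed: B drops A's split-into-cycles loop with its crash and cycle counters and its mutated dict: it finds the first occurrence of the start-of-app marker once, takes the suffix after it, sets each crash flag by one flat membership test on that suffix, and derives the no-crash flag logically from the other flags.
import Mathlib
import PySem

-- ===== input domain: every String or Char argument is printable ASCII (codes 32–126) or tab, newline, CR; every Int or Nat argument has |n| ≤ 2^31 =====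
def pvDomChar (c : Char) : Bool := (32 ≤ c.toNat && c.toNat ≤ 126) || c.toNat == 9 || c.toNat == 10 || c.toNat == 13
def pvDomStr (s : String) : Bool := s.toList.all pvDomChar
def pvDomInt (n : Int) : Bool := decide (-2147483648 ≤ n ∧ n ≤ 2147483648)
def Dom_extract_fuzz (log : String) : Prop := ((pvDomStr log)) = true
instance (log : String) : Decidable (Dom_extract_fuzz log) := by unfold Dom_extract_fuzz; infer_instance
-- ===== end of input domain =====

-- B replaces A's split-into-cycles loop (with crash/cycle counters) by one find of the first
-- 'Starting app...', flat membership tests on the suffix after it, and a derived no_crash flag.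

-- ===== PORT A =====
-- loop body of A's 'for i in cycles[1:]' over the state (result, crash_cnt, cycle_cnt)
def pvLoopBodyA (st : PySem.Dict String Int × Int × Int) (i : String) :
    PySem.Dict String Int × Int × Int :=
  let result := st.1
  let crash_cnt := st.2.1
  let cycle_cnt := st.2.2 + 1
  let p1 := if PySem.Str.isIn "Native crash detected!" i then
      (result.insert "native" 1, crash_cnt + 1) else (result, crash_cnt)
  let p2 := if PySem.Str.isIn "Java crash detected!" i then
      (p1.1.insert "java" 1, p1.2 + 1) else p1
  let p3 := if PySem.Str.isIn "ANR detected!" i then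
      (p2.1.insert "anr" 1, p2.2 + 1) else p2
  let p4 := if PySem.Str.isIn "Failed to start" i then
      (p3.1.insert "failtostart" 1, p3.2 + 1) else p3
  (p4.1, p4.2, cycle_cnt)

def extract_fuzz (log : String) : List (String × Int) :=
  let result : PySem.Dict String Int := PySem.Dict.ofList
    [("compile", 0), ("no_crash", 0), ("native", 0), ("java", 0), ("anr", 0), ("failtostart", 0)]
  let result := if PySem.Str.isIn "Starting app..." log then result.insert "compile" 1 else result
  let cycles : List String := (PySem.Str.split? log "Starting app...").getD []
  let st := (PySem.List.slice cycles (some 1) none).foldl pvLoopBodyA (result, 0, 0)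
  let result := st.1
  let crash_cnt := st.2.1
  let cycle_cnt := st.2.2
  let result := if cycle_cnt ≠ 0 then
      (if crash_cnt = 0 then result.insert "no_crash" 1 else result) else result
  result.items

-- ===== PORT B =====
def extract_fuzz_alt (log : String) : List (String × Int) :=
  let sep := "Starting app..."
  let i := PySem.Str.find log sep
  let started := i != -1
  let tail := if started then PySem.Str.slice log (some (i + PySem.Str.len sep)) none else ""
  let native : Int := if PySem.Str.isIn "Native crash detected!" tail then 1 else 0
  let java : Int := if PySem.Str.isIn "Java crash detected!" tail then 1 else 0
  let anr : Int := if PySem.Str.isIn "ANR detected!" tail then 1 else 0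
  let failtostart : Int := if PySem.Str.isIn "Failed to start" tail then 1 else 0
  let no_crash : Int :=
    if started && !(native != 0 || java != 0 || anr != 0 || failtostart != 0) then 1 else 0
  [("compile", if started then (1 : Int) else 0), ("no_crash", no_crash), ("native", native),
   ("java", java), ("anr", anr), ("failtostart", failtostart)]

-- ===== PRECONDITION & SPEC =====
def Spec_extract_fuzz (log : String) (out : List (String × Int)) : Prop := out = extract_fuzz_alt log
instance (log : String) (out : List (String × Int)) : Decidable (Spec_extract_fuzz log out) := by unfold Spec_extract_fuzz; infer_instance

-- ===== CLAIM (what is proved, stated in full; the proofs are below) =====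
def Claim_equal_extract_fuzz : Prop := ∀ (log : String), Dom_extract_fuzz log → Spec_extract_fuzz log (extract_fuzz log)

-- ===== LEMMAS AND PROOFS =====

def pvSplitRec (sep : List Char) : List Char → List (List Char)
  | [] => [[]]
  | c :: rest =>
    if h : sep ≠ [] ∧ sep.isPrefixOf (c :: rest) then
      [] :: pvSplitRec sep (List.drop sep.length (c :: rest))
    else
      match pvSplitRec sep rest with
      | [] => [[c]]
      | p :: ps => (c :: p) :: ps
  termination_by l => l.length
  decreasing_by
    · have : 1 ≤ sep.length := List.length_pos_iff.mpr h.1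
      simp; omega
    · simp

theorem pvSplitRec_ne_nil (sep l : List Char) : pvSplitRec sep l ≠ [] := by
  fun_induction pvSplitRec sep l <;> simp_all

theorem pv_splitRec_of_not_infix (sep l : List Char) (hs : sep ≠ []) (h : ¬ sep <:+: l) :
    pvSplitRec sep l = [l] := by
  fun_induction pvSplitRec sep l with
  | case1 => rfl
  | case2 c rest hc ih =>
    exact absurd ((List.isPrefixOf_iff_prefix.mp hc.2).isInfix) h
  | case3 c rest hc hm =>
    exact absurd hm (pvSplitRec_ne_nil sep rest)
  | case4 c rest hc p ps hm ih =>
    have hrest : ¬ sep <:+: rest := fun hi => h (hi.trans (List.suffix_cons c rest).isInfix)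
    rw [ih hrest] at hm
    simp_all

theorem pv_go_spec (sep : List Char) (hs : sep ≠ []) :
    ∀ (fuel : Nat) (l cur : List Char) (acc : List (List Char)), l.length < fuel →
      PySem.Chars.splitOn.go sep fuel l cur acc =
        acc.reverse ++ (cur.reverse ++ (pvSplitRec sep l).headI) :: (pvSplitRec sep l).tail := by
  intro fuel
  induction fuel with
  | zero => intro l cur acc h; omega
  | succ f ih =>
    intro l cur acc h
    match l with
    | [] =>
      simp [PySem.Chars.splitOn.go, pvSplitRec]
    | c :: rest =>
      rw [PySem.Chars.splitOn.go]
      by_cases hp : sep.isPrefixOf (c :: rest)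
      · have hlen : 1 ≤ sep.length := List.length_pos_iff.mpr hs
        have hdrop : (List.drop sep.length (c :: rest)).length < f := by
          simp at h ⊢; omega
        rw [if_pos hp, ih _ _ _ hdrop]
        have : pvSplitRec sep (c :: rest) = [] :: pvSplitRec sep (List.drop sep.length (c :: rest)) := by
          rw [pvSplitRec]; rw [dif_pos ⟨hs, hp⟩]
        rw [this]
        rcases hne : pvSplitRec sep (List.drop sep.length (c :: rest)) with _ | ⟨p, ps⟩
        · exact absurd hne (pvSplitRec_ne_nil _ _)
        · simp
      · have hlt : rest.length < f := by simp at h; omega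
        rw [if_neg hp, ih _ _ _ hlt]
        have hsplit : pvSplitRec sep (c :: rest) =
            (c :: (pvSplitRec sep rest).headI) :: (pvSplitRec sep rest).tail := by
          rw [pvSplitRec]
          rw [dif_neg (by simp [hp])]
          rcases hne : pvSplitRec sep rest with _ | ⟨p, ps⟩
          · exact absurd hne (pvSplitRec_ne_nil _ _)
          · simp
        rw [hsplit]
        simp

theorem pv_splitOn_eq (sep l : List Char) (hs : sep ≠ []) :
    PySem.Chars.splitOn l sep = pvSplitRec sep l := by
  rw [PySem.Chars.splitOn, pv_go_spec sep hs _ _ _ _ (by omega)]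
  rcases hne : pvSplitRec sep l with _ | ⟨p, ps⟩
  · exact absurd hne (pvSplitRec_ne_nil _ _)
  · simp

theorem pv_splitRec_first (sep : List Char) (hs : sep ≠ []) :
    ∀ (l : List Char) (j : Nat), sep <+: l.drop j → (∀ i, i < j → ¬ sep <+: l.drop i) →
      pvSplitRec sep l = l.take j :: pvSplitRec sep (l.drop (j + sep.length)) := by
  intro l
  induction l with
  | nil =>
    intro j hj hmin
    simp at hj
    exact absurd hj hs
  | cons c rest ih =>
    intro j hj hmin
    match j with
    | 0 =>
      simp at hj
      rw [pvSplitRec, dif_pos ⟨hs, List.isPrefixOf_iff_prefix.mpr hj⟩]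
      simp
    | j' + 1 =>
      have hnp : ¬ sep.isPrefixOf (c :: rest) := by
        intro hp
        exact hmin 0 (by omega) (by simpa using List.isPrefixOf_iff_prefix.mp hp)
      rw [pvSplitRec, dif_neg (by simp [hnp])]
      have hj' : sep <+: rest.drop j' := by simpa using hj
      have hmin' : ∀ i, i < j' → ¬ sep <+: rest.drop i := by
        intro i hi hp
        exact hmin (i+1) (by omega) (by simpa using hp)
      rw [ih j' hj' hmin']
      simp only [List.take_succ_cons]
      have harith : j' + 1 + sep.length = (j' + sep.length) + 1 := by omega
      rw [harith, List.drop_succ_cons]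

theorem pv_prefix_append_cases {m x y : List Char} (h : m <+: x ++ y) :
    m <+: x ∨ (x <+: m ∧ m.drop x.length <+: y) := by
  rcases h with ⟨t, ht⟩
  rcases List.append_eq_append_iff.mp ht with ⟨as, h1, h2⟩ | ⟨bs, h1, h2⟩
  · exact Or.inl ⟨as, h1.symm⟩
  · right
    subst h1
    refine ⟨⟨bs, rfl⟩, ?_⟩
    simp
    exact ⟨t, h2.symm⟩

def pvNoOv (sep m : List Char) : Prop :=
  m ≠ [] ∧ ¬ m <:+: sep ∧ ¬ sep <:+: m ∧
    (∀ k, k < sep.length → 0 < k → ¬ sep.drop k <+: m) ∧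
    (∀ k, k < sep.length → 0 < k → ¬ sep.take k <:+ m)

theorem pv_straddle (sep m a b : List Char) (h : pvNoOv sep m) :
    m <:+: (a ++ sep ++ b) ↔ m <:+: a ∨ m <:+: b := by
  obtain ⟨hm, h1, h2, h3, h4⟩ := h
  constructor
  · intro hin
    obtain ⟨j, hj⟩ : ∃ j, m <+: (a ++ sep ++ b).drop j := by
      obtain ⟨s, t, hst⟩ := hin
      exact ⟨s.length, by rw [← hst]; simp⟩
    rw [List.append_assoc, List.drop_append] at hj
    rcases Nat.lt_or_ge j a.length with hja | hja
    · -- (II) j < |a|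
      rcases pv_prefix_append_cases hj with hpa | ⟨hxa, hrest⟩
      · exact Or.inl (hpa.isInfix.trans (List.drop_suffix j a).isInfix)
      · have hk0 : j - a.length = 0 := by omega
        rw [hk0, List.drop_zero] at hrest
        set r := m.drop (List.drop j a).length with hrdef
        have hrsuf : r <:+ m := List.drop_suffix _ m
        by_cases hz : r = []
        · have hlen : m.length ≤ (List.drop j a).length := List.drop_eq_nil_iff.mp (hrdef ▸ hz)
          have heq : List.drop j a = m := hxa.eq_of_length_le hlen
          exact Or.inl (heq ▸ (List.drop_suffix j a).isInfix)
        · rcases pv_prefix_append_cases hrest with hps | ⟨hsp, _⟩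
          · -- r <+: sep
            have hrlen : r.length ≤ sep.length := hps.length_le
            rcases Nat.lt_or_ge r.length sep.length with hlt | hge
            · exact absurd (List.prefix_iff_eq_take.mp hps ▸ hrsuf)
                (h4 r.length hlt (by simpa [List.length_pos_iff] using hz))
            · have : r = sep := hps.eq_of_length_le (by omega)
              exact absurd ((this ▸ hrsuf).isInfix) h2
          · -- sep <+: r
            exact absurd (hsp.isInfix.trans hrsuf.isInfix) h2
    · -- (I) j ≥ |a|
      have ha : List.drop j a = [] := List.drop_eq_nil_iff.mpr (by omega)
      rw [ha, List.nil_append, List.drop_append] at hj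
      set k := j - a.length with hkdef
      rcases Nat.lt_or_ge k sep.length with hk | hk
      · have hb0 : k - sep.length = 0 := by omega
        rw [hb0, List.drop_zero] at hj
        rcases pv_prefix_append_cases hj with hps | ⟨hsp, _⟩
        · exact absurd (hps.isInfix.trans (List.drop_suffix k sep).isInfix) h1
        · rcases Nat.eq_zero_or_pos k with hk0 | hk0
          · rw [hk0, List.drop_zero] at hsp
            exact absurd hsp.isInfix h2
          · exact absurd hsp (h3 k hk hk0)
      · have : List.drop k sep = [] := List.drop_eq_nil_iff.mpr (by omega)
        rw [this, List.nil_append] at hj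
        exact Or.inr (hj.isInfix.trans (List.drop_suffix _ b).isInfix)
  · intro h
    rcases h with h | h
    · rw [List.append_assoc]
      exact h.trans (List.prefix_append a (sep ++ b)).isInfix
    · exact h.trans (List.suffix_append (a ++ sep) b).isInfix

theorem pv_any_pieces (sep m : List Char) (hs : sep ≠ []) (h : pvNoOv sep m) :
    ∀ l : List Char, (pvSplitRec sep l).any (fun p => PySem.Chars.isIn m p) = PySem.Chars.isIn m l := by
  suffices H : ∀ (N : Nat) (l : List Char), l.length ≤ N →
      (pvSplitRec sep l).any (fun p => PySem.Chars.isIn m p) = PySem.Chars.isIn m l by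
    intro l; exact H l.length l le_rfl
  intro N
  induction N with
  | zero =>
    intro l hl
    have : l = [] := List.length_eq_zero_iff.mp (by omega)
    subst this
    simp [pvSplitRec]
  | succ N ih =>
    intro l hl
    by_cases hin : sep <:+: l
    · have hpos : 0 ≤ PySem.Chars.find l sep := (PySem.Chars.find_nonneg_iff l sep).mpr hin
      obtain ⟨hj, hmin⟩ := PySem.Chars.find_spec hpos
      set j := (PySem.Chars.find l sep).toNat with hjdef
      rw [pv_splitRec_first sep hs l j hj hmin]
      obtain ⟨u, hu⟩ := hj
      have ht : List.drop (j + sep.length) l = u := by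
        rw [← List.drop_drop, ← hu]
        simp
      have hlsep : 1 ≤ sep.length := List.length_pos_iff.mpr hs
      have hjlen : j ≤ l.length := by
        have := congrArg List.length hu
        simp at this
        omega
      have hulen : u.length ≤ N := by
        have := congrArg List.length hu
        simp at this
        omega
      rw [ht, List.any_cons, ih u hulen]
      have hl_eq : l = l.take j ++ sep ++ u := by
        rw [List.append_assoc, hu]
        simp
      have hrhs : PySem.Chars.isIn m l = PySem.Chars.isIn m (l.take j ++ sep ++ u) := by
        rw [← hl_eq]
      rw [hrhs]
      apply Bool.eq_iff_iff.mpr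
      simp only [Bool.or_eq_true, PySem.Chars.isIn_iff_infix]
      exact (pv_straddle sep m _ _ h).symm
    · rw [pv_splitRec_of_not_infix sep l hs hin]
      simp

def pvD6 (c n nv jv av fv : Int) : PySem.Dict String Int :=
  PySem.Dict.ofList
    [("compile", c), ("no_crash", n), ("native", nv), ("java", jv), ("anr", av), ("failtostart", fv)]

theorem pvD6_insert_native (c n nv jv av fv : Int) :
    (pvD6 c n nv jv av fv).insert "native" 1 = pvD6 c n 1 jv av fv := rfl
theorem pvD6_insert_java (c n nv jv av fv : Int) :
    (pvD6 c n nv jv av fv).insert "java" 1 = pvD6 c n nv 1 av fv := rfl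
theorem pvD6_insert_anr (c n nv jv av fv : Int) :
    (pvD6 c n nv jv av fv).insert "anr" 1 = pvD6 c n nv jv 1 fv := rfl
theorem pvD6_insert_fail (c n nv jv av fv : Int) :
    (pvD6 c n nv jv av fv).insert "failtostart" 1 = pvD6 c n nv jv av 1 := rfl

set_option maxHeartbeats 2000000 in
theorem pv_fold_spec (cs : List String) : ∀ (c n nv jv av fv crash cyc : Int),
    cs.foldl pvLoopBodyA (pvD6 c n nv jv av fv, crash, cyc) =
      (pvD6 c n
        (if cs.any (fun i => PySem.Str.isIn "Native crash detected!" i) then 1 else nv)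
        (if cs.any (fun i => PySem.Str.isIn "Java crash detected!" i) then 1 else jv)
        (if cs.any (fun i => PySem.Str.isIn "ANR detected!" i) then 1 else av)
        (if cs.any (fun i => PySem.Str.isIn "Failed to start" i) then 1 else fv),
       crash + (cs.countP (fun i => PySem.Str.isIn "Native crash detected!" i) : Int)
             + (cs.countP (fun i => PySem.Str.isIn "Java crash detected!" i) : Int)
             + (cs.countP (fun i => PySem.Str.isIn "ANR detected!" i) : Int)
             + (cs.countP (fun i => PySem.Str.isIn "Failed to start" i) : Int),
       cyc + cs.length) := by
  induction cs with
  | nil => intro c n nv jv av fv crash cyc; simp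
  | cons i rest ih =>
    intro c n nv jv av fv crash cyc
    rw [List.foldl_cons]
    have hstep : pvLoopBodyA (pvD6 c n nv jv av fv, crash, cyc) i =
        (pvD6 c n (if PySem.Str.isIn "Native crash detected!" i then 1 else nv)
                  (if PySem.Str.isIn "Java crash detected!" i then 1 else jv)
                  (if PySem.Str.isIn "ANR detected!" i then 1 else av)
                  (if PySem.Str.isIn "Failed to start" i then 1 else fv),
         crash + (if PySem.Str.isIn "Native crash detected!" i then 1 else 0)
               + (if PySem.Str.isIn "Java crash detected!" i then 1 else 0)
               + (if PySem.Str.isIn "ANR detected!" i then 1 else 0)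
               + (if PySem.Str.isIn "Failed to start" i then 1 else 0),
         cyc + 1) := by
      simp only [pvLoopBodyA]
      by_cases h1 : PySem.Str.isIn "Native crash detected!" i <;>
        by_cases h2 : PySem.Str.isIn "Java crash detected!" i <;>
          by_cases h3 : PySem.Str.isIn "ANR detected!" i <;>
            by_cases h4 : PySem.Str.isIn "Failed to start" i <;>
              simp only [h1, h2, h3, h4, Bool.false_eq_true, if_true, if_false,
                pvD6_insert_native, pvD6_insert_java, pvD6_insert_anr, pvD6_insert_fail] <;>
              norm_num
    rw [hstep, ih]
    simp only [List.any_cons, List.countP_cons, List.length_cons]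
    have merge : ∀ (x y : Bool) (v : Int), (if y then (1:Int) else if x then 1 else v) = (if (x || y) then 1 else v) := by
      intro x y v; cases x <;> cases y <;> simp
    have castif : ∀ (x : Bool), ((if x then (1:Nat) else 0) : Int) = (if x then (1:Int) else 0) := by
      intro x; cases x <;> simp
    refine congrArg₂ Prod.mk ?_ (congrArg₂ Prod.mk ?_ ?_)
    · rw [merge, merge, merge, merge]
      rfl
    · push_cast [castif]
      ring
    · push_cast; ring

theorem pv_noov_native : pvNoOv "Starting app...".toList "Native crash detected!".toList := by
  unfold pvNoOv; refine ⟨by decide, by decide, by decide, by decide, by decide⟩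
theorem pv_noov_java : pvNoOv "Starting app...".toList "Java crash detected!".toList := by
  unfold pvNoOv; refine ⟨by decide, by decide, by decide, by decide, by decide⟩
theorem pv_noov_anr : pvNoOv "Starting app...".toList "ANR detected!".toList := by
  unfold pvNoOv; refine ⟨by decide, by decide, by decide, by decide, by decide⟩
theorem pv_noov_fail : pvNoOv "Starting app...".toList "Failed to start".toList := by
  unfold pvNoOv; refine ⟨by decide, by decide, by decide, by decide, by decide⟩

theorem pvD6_insert_compile (c n nv jv av fv : Int) :
    (pvD6 c n nv jv av fv).insert "compile" 1 = pvD6 1 n nv jv av fv := rfl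
theorem pvD6_insert_no_crash (c n nv jv av fv : Int) :
    (pvD6 c n nv jv av fv).insert "no_crash" 1 = pvD6 c 1 nv jv av fv := rfl
theorem pvD6_items (c n nv jv av fv : Int) :
    (pvD6 c n nv jv av fv).items =
      [("compile", c), ("no_crash", n), ("native", nv), ("java", jv), ("anr", av), ("failtostart", fv)] := rfl

theorem pvD6_zero :
    PySem.Dict.ofList
      [("compile", (0:Int)), ("no_crash", 0), ("native", 0), ("java", 0), ("anr", 0), ("failtostart", 0)]
      = pvD6 0 0 0 0 0 0 := rfl

theorem pv_crash_zero {α : Type} (ps : List α) (p1 p2 p3 p4 : α → Bool) :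
    ((ps.countP p1 : Int) + ps.countP p2 + ps.countP p3 + ps.countP p4 = 0) ↔
      (ps.any p1 = false ∧ ps.any p2 = false ∧ ps.any p3 = false ∧ ps.any p4 = false) := by
  have h : ∀ p : α → Bool, (ps.countP p = 0) ↔ ps.any p = false := by
    intro p
    rw [List.countP_eq_zero, List.any_eq_false]
  rw [← h p1, ← h p2, ← h p3, ← h p4]
  omega

-- ===== VERDICT (by name: the statement is the Claim_ definition above) =====
set_option maxHeartbeats 2000000 in
theorem extract_fuzz_spec : Claim_equal_extract_fuzz := by
  intro log _
  unfold Spec_extract_fuzz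
  have hsep : ("Starting app...".toList) ≠ [] := by decide
  have hcyc : (PySem.Str.split? log "Starting app...").getD [] =
      (pvSplitRec "Starting app...".toList log.toList).map String.ofList := by
    rw [PySem.Str.split?]
    simp [PySem.Chars.split?]
    rw [pv_splitOn_eq _ _ (by decide)]
  by_cases hin : ("Starting app...".toList) <:+: log.toList
  · -- separator occurs
    have h1 : PySem.Str.isIn "Starting app..." log = true := by
      rw [PySem.Str.isIn_eq]
      exact (PySem.Chars.isIn_iff_infix _ _).mpr hin
    have hf0 : 0 ≤ PySem.Chars.find log.toList "Starting app...".toList :=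
      (PySem.Chars.find_nonneg_iff _ _).mpr hin
    obtain ⟨hj, hmin⟩ := PySem.Chars.find_spec hf0
    set jn := (PySem.Chars.find log.toList "Starting app...".toList).toNat with hjn
    obtain ⟨u, hu⟩ := hj
    have hlen15 : ("Starting app...".toList).length = 15 := by decide
    have ht : log.toList.drop (jn + 15) = u := by
      have h2 : u = (log.toList.drop jn).drop 15 := by
        rw [← hu, ← hlen15]
        simp
      rw [h2, List.drop_drop, Nat.add_comm]
    have hfirst := pv_splitRec_first _ hsep log.toList jn ⟨u, hu⟩ hmin
    rw [hlen15, ht] at hfirst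
    have hF : PySem.Str.find log "Starting app..." = (jn : Int) := by
      rw [PySem.Str.find_eq]
      omega
    have hlenS : PySem.Str.len "Starting app..." = 15 := by decide
    have hmapa : ∀ (m : String) (ps : List (List Char)),
        ((ps.map String.ofList).any fun i => PySem.Str.isIn m i) =
          ps.any (fun p => PySem.Chars.isIn m.toList p) := by
      intro m ps
      rw [List.any_map]
      congr 1
      funext p
      simp [PySem.Str.isIn_eq]
    have hmapc : ∀ (m : String) (ps : List (List Char)),
        ((ps.map String.ofList).countP fun i => PySem.Str.isIn m i) =
          ps.countP (fun p => PySem.Chars.isIn m.toList p) := by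
      intro m ps
      rw [List.countP_map]
      congr 1
      funext p
      simp [PySem.Str.isIn_eq]
    have hanyN := pv_any_pieces _ _ hsep pv_noov_native u
    have hanyJ := pv_any_pieces _ _ hsep pv_noov_java u
    have hanyA := pv_any_pieces _ _ hsep pv_noov_anr u
    have hanyF := pv_any_pieces _ _ hsep pv_noov_fail u
    have htoN : ((jn : Int) + 15).toNat = jn + 15 := by omega
    have hpos : 0 < (pvSplitRec "Starting app...".toList u).length :=
      List.length_pos_iff.mpr (pvSplitRec_ne_nil _ _)
    simp only [extract_fuzz, extract_fuzz_alt, h1, hcyc, hfirst, hF, pvD6_zero,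
      pvD6_insert_compile, hlenS, if_true]
    rw [PySem.List.slice_from _ (by norm_num)]
    norm_num
    rw [pv_fold_spec]
    rw [hmapa, hmapa, hmapa, hmapa, hmapc, hmapc, hmapc, hmapc,
      hanyN, hanyJ, hanyA, hanyF]
    have htail : ∀ m : String, PySem.Str.isIn m
        (PySem.Str.slice log (some ((jn : Int) + 15))) = PySem.Chars.isIn m.toList u := by
      intro m
      rw [PySem.Str.isIn_eq, PySem.Str.toList_slice]
      simp only [PySem.Chars.slice_eq_listSlice]
      rw [PySem.List.slice_from _ (by omega), htoN, ht]
    have hstarted : ¬ ((jn : Int) = -1) := by omega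
    have htail2 : (PySem.Str.slice log (some ((jn : Int) + 15))).toList = u := by
      rw [PySem.Str.toList_slice]
      simp only [PySem.Chars.slice_eq_listSlice]
      rw [PySem.List.slice_from _ (by omega), htoN, ht]
    simp only [if_neg hstarted, htail2, zero_add, List.length_map]
    have hcrash := pv_crash_zero (pvSplitRec "Starting app...".toList u)
      (fun p => PySem.Chars.isIn "Native crash detected!".toList p)
      (fun p => PySem.Chars.isIn "Java crash detected!".toList p)
      (fun p => PySem.Chars.isIn "ANR detected!".toList p)
      (fun p => PySem.Chars.isIn "Failed to start".toList p)
    rw [hanyN, hanyJ, hanyA, hanyF] at hcrash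
    have hcy : ¬ (((pvSplitRec "Starting app...".toList u).length : Int) = 0) := by omega
    rw [if_neg hcy, if_congr hcrash rfl rfl]
    by_cases bN : PySem.Chars.isIn "Native crash detected!".toList u <;>
      by_cases bJ : PySem.Chars.isIn "Java crash detected!".toList u <;>
        by_cases bA : PySem.Chars.isIn "ANR detected!".toList u <;>
          by_cases bF : PySem.Chars.isIn "Failed to start".toList u <;>
            simp at bN bJ bA bF <;>
            simp [bN, bJ, bA, bF, pvD6_insert_no_crash, pvD6_items]
  · -- separator never occurs: no cycles
    have h1 : PySem.Str.isIn "Starting app..." log = false := by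
      rw [PySem.Str.isIn_eq]
      exact (PySem.Chars.isIn_eq_false_iff _ _).mpr hin
    have hf : PySem.Str.find log "Starting app..." = -1 := by
      exact (PySem.Str.find_eq_neg_one_iff _ _).mpr hin
    have hrec := pv_splitRec_of_not_infix _ _ hsep hin
    simp only [extract_fuzz, extract_fuzz_alt, h1, hf, hcyc, hrec, pvD6_zero]
    norm_num
    rw [PySem.List.slice_from _ (by norm_num)]
    have e1 : PySem.Chars.isIn "Native crash detected!".toList [] = false := by decide
    have e2 : PySem.Chars.isIn "Java crash detected!".toList [] = false := by decide
    have e3 : PySem.Chars.isIn "ANR detected!".toList [] = false := by decide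
    have e4 : PySem.Chars.isIn "Failed to start".toList [] = false := by decide
    norm_num [e1, e2, e3, e4, pvD6_items]
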